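-- pv_equiv track=rewrite | github.com/vasilescur/WOTO-Time | woto_getter.py | html_parser
-- ===== SOURCE A (Python) =====
-- def html_parser(string):
--
--     l = []
--     write = 1
--     for x in string:
--         if x == "<":
--             write = 0
--         if x == ">":
--             x = '\t'
--             write = 1
--         if write:
--             l.append(x)
--
--     l = ("".join(l)).split("\t")
--
--     return l
-- ===== SOURCE B (Python) =====
-- import re
--
-- def html_parser(string):
--     # Delete each '<' together with the run of non-'>' chars after it,
--     # then turn every remaining '>' into a tab and split on tabs.
--     return re.sub(r'<[^>]*', '', string).replace('>', '\t').split('\t')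
-- ===== Notes on version B (the rewrite author's own statement) =====
-- stated objective: idiomatic
-- what changed: Replaced the per-character write-flag state machine with a three-step string pipeline: a regex deletes every '<' plus its run of non-'>' characters, then '>' is replaced by a tab, then the string is split on tabs.
import Mathlib
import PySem

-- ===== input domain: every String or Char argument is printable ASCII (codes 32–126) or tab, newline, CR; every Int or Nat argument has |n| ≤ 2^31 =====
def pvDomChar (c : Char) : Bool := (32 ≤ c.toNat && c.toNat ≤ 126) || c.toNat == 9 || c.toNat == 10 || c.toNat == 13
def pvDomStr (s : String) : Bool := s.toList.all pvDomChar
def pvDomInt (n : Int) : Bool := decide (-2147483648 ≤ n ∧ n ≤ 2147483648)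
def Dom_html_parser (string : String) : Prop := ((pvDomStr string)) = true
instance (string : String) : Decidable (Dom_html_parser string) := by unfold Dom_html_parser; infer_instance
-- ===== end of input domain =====

-- B replaces A's per-character write-flag state machine with a regex/replace/split pipeline (idiomatic; same cost).

-- ===== PORT A =====
-- the loop body: the write flag (Python int 0/1) and the accumulated char list
def pvStepA (st : List Char × Int) (x : Char) : List Char × Int :=
  let write := if x = '<' then (0 : Int) else st.2
  let xw := if x = '>' then ('\t', (1 : Int)) else (x, write)
  (if xw.2 ≠ 0 then st.1 ++ [xw.1] else st.1, xw.2)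

def html_parser (string : String) : List String :=
  -- ("".join(l)).split("\t"): join the collected chars, split on tab
  (PySem.Chars.splitOn (string.toList.foldl pvStepA ([], 1)).1 ['\t']).map String.ofList

-- ===== PORT B =====
-- hand port of re.sub(r'<[^>]*', '', s): the regex engine scans left to right; a match
-- starts at each '<' and greedily consumes the maximal run of non-'>' characters; the
-- match is removed and scanning resumes. Exact for this pattern.
mutual
def pvSub : List Char → List Char
  | [] => []
  | c :: cs => if c = '<' then pvSkip cs else c :: pvSub cs
def pvSkip : List Char → List Char
  | [] => []
  | c :: cs => if c = '>' then '>' :: pvSub cs else pvSkip cs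
end

-- .replace('>', '\t') with a one-character pattern, ported as a character map (exact)
def pvRepl (c : Char) : Char := if c = '>' then '\t' else c

def html_parser_alt (string : String) : List String :=
  (PySem.Chars.splitOn ((pvSub string.toList).map pvRepl) ['\t']).map String.ofList

-- ===== PRECONDITION & SPEC =====
def Spec_html_parser (string : String) (out : List String) : Prop := out = html_parser_alt string
instance (string : String) (out : List String) : Decidable (Spec_html_parser string out) := by unfold Spec_html_parser; infer_instance

-- ===== CLAIM (what is proved, stated in full; the proofs are below) =====
def Claim_equal_html_parser : Prop := ∀ (string : String), Dom_html_parser string → Spec_html_parser string (html_parser string)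

-- ===== LEMMAS AND PROOFS =====

-- joint loop invariant: A's fold in write mode (flag 1) produces B's stripped/replaced
-- text, and in skip mode (flag 0) it produces the pvSkip branch likewise.
theorem pvFold_eq (cs : List Char) : ∀ (l : List Char),
    (cs.foldl pvStepA (l, 1)).1 = l ++ (pvSub cs).map pvRepl ∧
    (cs.foldl pvStepA (l, 0)).1 = l ++ (pvSkip cs).map pvRepl := by
  induction cs with
  | nil => intro l; simp [pvSub, pvSkip]
  | cons c cs ih =>
    intro l
    by_cases h1 : c = '<'
    · subst h1
      simpa [pvStepA, pvSub, pvSkip] using (ih l).2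
    · by_cases h2 : c = '>'
      · subst h2
        constructor <;>
          simpa [pvStepA, pvSub, pvSkip, pvRepl, h1] using (ih (l ++ ['\t'])).1
      · refine ⟨?_, ?_⟩
        · simpa [pvStepA, pvSub, pvRepl, h1, h2] using (ih (l ++ [c])).1
        · simpa [pvStepA, pvSkip, h1, h2] using (ih l).2

-- ===== VERDICT (by name: the statement is the Claim_ definition above) =====
theorem html_parser_spec : Claim_equal_html_parser := by
  intro s _
  unfold Spec_html_parser html_parser html_parser_alt
  rw [(pvFold_eq s.toList []).1]
  simp
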